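-- pv_equiv track=rewrite | github.com/eehwan/Algorithm-solutions | Programmers/ETC/Level 2/삼각 달팽이.py | solution
-- ===== SOURCE A (Python) =====
-- def solution(n):
--     triangle = [[0 for _ in range(i+1)] for i in range(n)]
--     y, x = -1, 0
--     number = 1
--     for i in range(n):
--         for j in range(i, n):
--             if i % 3 == 0:
--                 y += 1
--             elif i % 3 == 1:
--                 x += 1
--             elif i % 3 == 2:
--                 y -= 1; x -= 1
--             triangle[y][x] = number
--             number += 1
--     return sum(map(sum, triangle))
-- ===== SOURCE B (Python) =====
-- def solution(n):
--     # The snail spiral writes consecutive numbers once each into the cells of the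
--     # triangle, so the result is the triangular number of the triangular number of n.
--     if n <= 0:
--         return 0
--     total = n * (n + 1) // 2
--     return total * (total + 1) // 2
-- ===== Notes on version B (the rewrite author's own statement) =====
-- stated objective: faster
-- what changed: Replaces the quadratic cell-by-cell simulation of the triangular snail spiral with a closed form: the spiral writes consecutive numbers each into a distinct cell, so the answer is the triangular number of the triangular number of n.
import Mathlib
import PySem

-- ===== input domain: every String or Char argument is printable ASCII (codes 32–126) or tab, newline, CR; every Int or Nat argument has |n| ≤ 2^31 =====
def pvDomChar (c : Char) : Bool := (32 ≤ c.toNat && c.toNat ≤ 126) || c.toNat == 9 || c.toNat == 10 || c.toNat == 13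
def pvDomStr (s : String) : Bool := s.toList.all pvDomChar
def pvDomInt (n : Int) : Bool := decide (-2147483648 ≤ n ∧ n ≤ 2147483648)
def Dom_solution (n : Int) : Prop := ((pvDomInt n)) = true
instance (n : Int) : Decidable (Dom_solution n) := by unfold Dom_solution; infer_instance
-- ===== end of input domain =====

-- B replaces A's quadratic spiral simulation by a closed form (the triangular number of the triangular number of n); measured faster in a timing run.

-- ===== PORT A =====
-- triangle[y][x] = number  (in-place write; indices are always in range when the loops run,
-- so the total pySetD/pyGetD forms are exact here)
def snailWrite (tri : List (List Int)) (y x v : Int) : List (List Int) :=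
  PySem.List.pySetD tri y (PySem.List.pySetD (PySem.List.pyGetD tri y []) x v)

-- body of the inner `for j in range(i, n)` loop (j itself is unused by the body)
def snailStep (i : Int) :
    (List (List Int) × Int × Int × Int) → Int → (List (List Int) × Int × Int × Int) :=
  fun s _j =>
    let (tri, y, x, number) := s
    let (y, x) :=
      if PySem.Int.mod i 3 = 0 then (y + 1, x)
      else if PySem.Int.mod i 3 = 1 then (y, x + 1)
      else if PySem.Int.mod i 3 = 2 then (y - 1, x - 1)
      else (y, x)  -- unreachable: i % 3 ∈ {0,1,2}
    (snailWrite tri y x number, y, x, number + 1)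

def solution (n : Int) : Int :=
  let triangle : List (List Int) :=
    (PySem.List.pyRange 0 n 1).map (fun i => (PySem.List.pyRange 0 (i + 1) 1).map (fun _ => (0 : Int)))
  let st := (PySem.List.pyRange 0 n 1).foldl
      (fun s i => (PySem.List.pyRange i n 1).foldl (snailStep i) s)
      (triangle, -1, 0, 1)
  -- sum(map(sum, triangle)): Python sum of ints = List.sum
  (st.1.map List.sum).sum

-- ===== PORT B =====
def solution_alt (n : Int) : Int :=
  if n ≤ 0 then 0
  else
    let total := PySem.Int.floordiv (n * (n + 1)) 2
    PySem.Int.floordiv (total * (total + 1)) 2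

-- ===== PRECONDITION & SPEC =====
def Spec_solution (n : Int) (out : Int) : Prop := out = solution_alt n
instance (n : Int) (out : Int) : Decidable (Spec_solution n out) := by unfold Spec_solution; infer_instance

-- ===== CLAIM (what is proved, stated in full; the proofs are below) =====
def Claim_equal_solution : Prop := ∀ (n : Int), Dom_solution n → Spec_solution n (solution n)

-- ===== LEMMAS AND PROOFS =====

-- total of a triangle
def sum2 (tri : List (List Int)) : Int := (tri.map List.sum).sum

-- apply a list of ((y, x), v) writes
def applyW (tri : List (List Int)) (ws : List ((Int × Int) × Int)) : List (List Int) :=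
  ws.foldl (fun t w => snailWrite t w.1.1 w.1.2 w.2) tri

-- one pass of the spiral, as a pure direction step
def runDir (dy dx : Int) :
    (List (List Int) × Int × Int × Int) → Int → (List (List Int) × Int × Int × Int) :=
  fun s _j => (snailWrite s.1 (s.2.1 + dy) (s.2.2.1 + dx) s.2.2.2, s.2.1 + dy, s.2.2.1 + dx, s.2.2.2 + 1)

-- write sequence of one pass: m steps from (y,x), moving (dy,dx) before each write
def seqW (y x dy dx num : Int) : Nat → List ((Int × Int) × Int)
  | 0 => []
  | Nat.succ m => ((y + dy, x + dx), num) :: seqW (y + dy) (x + dx) dy dx (num + 1) m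

-- closed-form position of write t (0-based) of pass i, for triangle size m
def posY (m i t : Nat) : Int :=
  if i % 3 = 0 then 2 * ((i / 3 : Nat) : Int) + (t : Int)
  else if i % 3 = 1 then (m : Int) - ((i / 3 : Nat) : Int) - 1
  else (m : Int) - ((i / 3 : Nat) : Int) - 2 - (t : Int)
def posX (m i t : Nat) : Int :=
  if i % 3 = 0 then ((i / 3 : Nat) : Int)
  else if i % 3 = 1 then ((i / 3 : Nat) : Int) + 1 + (t : Int)
  else (m : Int) - 2 * ((i / 3 : Nat) : Int) - 2 - (t : Int)

-- position of the pen just BEFORE pass i starts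
def preY (m i : Nat) : Int :=
  if i % 3 = 0 then 2 * ((i / 3 : Nat) : Int) - 1
  else (m : Int) - ((i / 3 : Nat) : Int) - 1
def preX (m i : Nat) : Int :=
  if i % 3 = 0 then ((i / 3 : Nat) : Int)
  else if i % 3 = 1 then ((i / 3 : Nat) : Int)
  else (m : Int) - 2 * ((i / 3 : Nat) : Int) - 1
def dyOf (r : Nat) : Int := if r = 0 then 1 else if r = 1 then 0 else -1
def dxOf (r : Nat) : Int := if r = 0 then 0 else if r = 1 then 1 else -1

-- `number` at the start of pass i
def numStart (m : Nat) : Nat → Int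
  | 0 => 1
  | Nat.succ i => numStart m i + ((m : Int) - (i : Int))

def passW (m i : Nat) : List ((Int × Int) × Int) :=
  (List.range (m - i)).map (fun (t : Nat) => ((posY m i t, posX m i t), numStart m i + (t : Int)))

def WAll (m : Nat) : List ((Int × Int) × Int) := (List.range m).flatMap (passW m)

def tri0 (m : Nat) : List (List Int) := (List.range m).map (fun a => List.replicate (a + 1) (0 : Int))


def getCell (tri : List (List Int)) (p : Int × Int) : Int :=
  (tri.getD p.1.toNat []).getD p.2.toNat 0

def Pvalid (m : Nat) (p : Int × Int) : Prop := 0 ≤ p.2 ∧ p.2 ≤ p.1 ∧ p.1 < (m : Int)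

def Shape (m : Nat) (tri : List (List Int)) : Prop :=
  tri.length = m ∧ ∀ a, a < m → (tri.getD a []).length = a + 1

-- ---- row/grid primitives ----

lemma listSum_set (l : List Int) (i : Nat) (v : Int) (h : i < l.length) :
    (l.set i v).sum = l.sum + v - l.getD i 0 := by
  induction l generalizing i with
  | nil => simp at h
  | cons hd tl ih =>
    cases i with
    | zero => simp [List.getD]; ring
    | succ j =>
      have h' : j < tl.length := by simpa using h
      simp only [List.set, List.sum_cons, List.getD_cons_succ]
      rw [ih j h']; ring

lemma getD_map_sum (tri : List (List Int)) (a : Nat) :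
    (tri.map List.sum).getD a 0 = (tri.getD a []).sum := by
  induction tri generalizing a with
  | nil => simp [List.getD]
  | cons hd tl ih =>
    cases a with
    | zero => simp [List.getD]
    | succ j => simpa [List.getD_cons_succ] using ih j

lemma getD_set_self {α : Type} (l : List α) (i : Nat) (x d : α) (h : i < l.length) :
    (l.set i x).getD i d = x := by
  simp [List.getD_eq_getElem?_getD, List.getElem?_set, h]

lemma getD_set_ne {α : Type} (l : List α) (i j : Nat) (x d : α) (h : i ≠ j) :
    (l.set i x).getD j d = l.getD j d := by
  simp [List.getD_eq_getElem?_getD, List.getElem?_set, h]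

lemma sum2_set (tri : List (List Int)) (a b : Nat) (v : Int)
    (ha : a < tri.length) (hb : b < (tri.getD a []).length) :
    sum2 (tri.set a ((tri.getD a []).set b v)) = sum2 tri + v - (tri.getD a []).getD b 0 := by
  unfold sum2
  rw [List.map_set, listSum_set _ a _ (by simpa using ha), getD_map_sum,
    listSum_set _ b v hb]
  ring

lemma getCell_set_ne (tri : List (List Int)) (a b : Nat) (v : Int) (p : Int × Int)
    (hp1 : 0 ≤ p.1) (hp2 : 0 ≤ p.2) (hne : p ≠ ((a : Int), (b : Int))) :
    getCell (tri.set a ((tri.getD a []).set b v)) p = getCell tri p := by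
  unfold getCell
  by_cases h1 : p.1.toNat = a
  · have hpa : p.1 = (a : Int) := by omega
    have hpb : p.2 ≠ (b : Int) := by
      intro hb
      exact hne (Prod.ext hpa hb)
    have hbn : p.2.toNat ≠ b := by omega
    by_cases hlen : a < tri.length
    · rw [h1, getD_set_self _ _ _ _ hlen, getD_set_ne _ _ _ _ _ (fun hx => hbn hx.symm)]
    · rw [List.set_eq_of_length_le (by omega)]
  · rw [getD_set_ne _ _ _ _ _ (fun hx => h1 hx.symm)]

lemma shape_set (m : Nat) (tri : List (List Int)) (a b : Nat) (v : Int)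
    (hsh : Shape m tri) :
    Shape m (tri.set a ((tri.getD a []).set b v)) := by
  obtain ⟨hlen, hrow⟩ := hsh
  refine ⟨by simpa using hlen, ?_⟩
  intro a' ha'
  by_cases h : a = a'
  · subst h
    rw [getD_set_self _ _ _ _ (by omega)]
    simpa using hrow a ha'
  · rw [getD_set_ne _ _ _ _ _ h]
    exact hrow a' ha'

-- snailWrite in set/​getD form, under validity
lemma snailWrite_eq (tri : List (List Int)) (y x v : Int) (hy : 0 ≤ y) (hx : 0 ≤ x) :
    snailWrite tri y x v = tri.set y.toNat ((tri.getD y.toNat []).set x.toNat v) := by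
  unfold snailWrite
  rw [PySem.List.pyGetD_of_nonneg tri [] hy, PySem.List.pySetD_of_nonneg _ v hx,
    PySem.List.pySetD_of_nonneg _ _ hy]

-- ---- the key accounting lemma: distinct in-bounds writes into zero cells add up ----

lemma applyW_sum (m : Nat) (ws : List ((Int × Int) × Int)) :
    ∀ tri, Shape m tri →
      (∀ w ∈ ws, Pvalid m w.1 ∧ getCell tri w.1 = 0) →
      ((ws.map Prod.fst).Nodup) →
      sum2 (applyW tri ws) = sum2 tri + (ws.map Prod.snd).sum := by
  induction ws with
  | nil => intro tri _ _ _; simp [applyW]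
  | cons w ws ih =>
    intro tri hsh hall hnd
    obtain ⟨hv, h0⟩ := hall w (List.mem_cons_self)
    obtain ⟨hx0, hxy, hym⟩ := hv
    have hy0 : 0 ≤ w.1.1 := le_trans hx0 hxy
    set a := w.1.1.toNat with hadef
    set b := w.1.2.toNat with hbdef
    have ha : a < tri.length := by rw [hsh.1]; omega
    have hb : b < (tri.getD a []).length := by
      rw [hsh.2 a (by omega)]; omega
    have hwr : snailWrite tri w.1.1 w.1.2 w.2 = tri.set a ((tri.getD a []).set b w.2) :=
      snailWrite_eq tri _ _ _ hy0 hx0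
    have happ : applyW tri (w :: ws) = applyW (tri.set a ((tri.getD a []).set b w.2)) ws := by
      unfold applyW
      rw [List.foldl_cons, hwr]
    have hcast : w.1 = ((a : Int), (b : Int)) := by
      refine Prod.ext ?_ ?_ <;> simp [hadef, hbdef] <;> omega
    have hsum : sum2 (tri.set a ((tri.getD a []).set b w.2)) = sum2 tri + w.2 := by
      rw [sum2_set tri a b w.2 ha hb]
      have : (tri.getD a []).getD b 0 = getCell tri w.1 := by unfold getCell; rfl
      rw [this, h0]; ring
    rw [happ, ih _ (shape_set m tri a b w.2 hsh) ?_ (by simpa using hnd.of_cons), hsum]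
    · simp; ring
    · intro w' hw'
      refine ⟨(hall w' (List.mem_cons_of_mem _ hw')).1, ?_⟩
      have hnotin : w.1 ∉ ws.map Prod.fst := by
        have h' := hnd
        simp only [List.map_cons, List.nodup_cons] at h'
        exact h'.1
      have hne : w'.1 ≠ ((a : Int), (b : Int)) := by
        rw [← hcast]
        intro hcontr
        exact hnotin (by rw [← hcontr]; exact List.mem_map_of_mem hw')
      rw [getCell_set_ne tri a b w.2 w'.1
            (le_trans (hall w' (List.mem_cons_of_mem _ hw')).1.1 (hall w' (List.mem_cons_of_mem _ hw')).1.2.1)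
            (hall w' (List.mem_cons_of_mem _ hw')).1.1 hne]
      exact (hall w' (List.mem_cons_of_mem _ hw')).2

-- ---- one pass of the loop ----

lemma seqW_eq (m0 : Nat) : ∀ (y x dy dx num : Int),
    seqW y x dy dx num m0 =
      (List.range m0).map (fun (t : Nat) =>
        ((y + ((t : Int) + 1) * dy, x + ((t : Int) + 1) * dx), num + (t : Int))) := by
  induction m0 with
  | zero => intro y x dy dx num; simp [seqW]
  | succ k ih =>
    intro y x dy dx num
    rw [List.range_succ_eq_map, List.map_cons, List.map_map,
      show seqW y x dy dx num (k+1) = ((y + dy, x + dx), num) :: seqW (y + dy) (x + dx) dy dx (num + 1) k from rfl,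
      ih]
    refine List.cons_eq_cons.mpr ⟨?_, ?_⟩
    · refine Prod.ext (Prod.ext ?_ ?_) ?_ <;> push_cast <;> ring
    · apply List.map_congr_left
      intro t ht
      simp only [Function.comp]
      refine Prod.ext (Prod.ext ?_ ?_) ?_ <;> push_cast <;> ring

lemma foldl_runDir (dy dx : Int) (l : List Int) :
    ∀ (tri : List (List Int)) (y x num : Int),
      l.foldl (runDir dy dx) (tri, y, x, num) =
        (applyW tri (seqW y x dy dx num l.length),
          y + l.length * dy, x + l.length * dx, num + l.length) := by
  induction l with
  | nil => intro tri y x num; simp [seqW, applyW]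
  | cons hd tl ih =>
    intro tri y x num
    rw [List.foldl_cons]
    show tl.foldl (runDir dy dx) (snailWrite tri (y+dy) (x+dx) num, y+dy, x+dx, num+1) = _
    rw [ih]
    refine Prod.ext ?_ (Prod.ext ?_ (Prod.ext ?_ ?_)) <;> simp [seqW, applyW] <;> push_cast <;> ring

lemma snailStep_eq (i : Int) (r : Nat) (hr : r < 3) (h : PySem.Int.mod i 3 = (r : Int)) :
    snailStep i = runDir (dyOf r) (dxOf r) := by
  funext s j
  obtain ⟨tri, y, x, num⟩ := s
  interval_cases r <;>
    simp_all [snailStep, runDir, dyOf, dxOf, sub_eq_add_neg]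


-- ---- executing one pass from its pre-position ----

lemma pass_step (m c : Nat) (hc : c < m) (tri : List (List Int)) :
    (PySem.List.pyRange (c : Int) (m : Int) 1).foldl (snailStep (c : Int))
        (tri, preY m c, preX m c, numStart m c)
      = (applyW tri (passW m c), preY m (c + 1), preX m (c + 1), numStart m (c + 1)) := by
  have hmod : PySem.Int.mod (c : Int) 3 = ((c % 3 : Nat) : Int) := by
    exact_mod_cast PySem.Int.mod_natCast c 3
  have hlen : (PySem.List.pyRange (c : Int) (m : Int) 1).length = m - c := by
    rw [PySem.List.length_pyRange_one]; omega
  have h3 : c % 3 = 0 ∨ c % 3 = 1 ∨ c % 3 = 2 := by omega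
  rcases h3 with h | h | h
  case _ =>
    rw [snailStep_eq (c : Int) 0 (by norm_num) (by rw [hmod, h]; try norm_num),
      foldl_runDir, hlen, seqW_eq]
    have h1 : (c + 1) % 3 = 1 := by omega
    have h1' : (c + 1) / 3 = c / 3 := by omega
    refine Prod.ext ?_ (Prod.ext ?_ (Prod.ext ?_ ?_))
    · show applyW tri _ = applyW tri (passW m c)
      congr 1
      unfold passW
      apply List.map_congr_left
      intro t ht
      have ht' : t < m - c := List.mem_range.mp ht
      refine Prod.ext (Prod.ext ?_ ?_) ?_ <;>
        simp [posY, posX, preY, preX, dyOf, dxOf, h] <;> try omega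
    · show preY m c + ((m - c : Nat) : Int) * dyOf 0 = preY m (c + 1)
      simp [preY, dyOf, h, h1, h1']; omega
    · show preX m c + ((m - c : Nat) : Int) * dxOf 0 = preX m (c + 1)
      simp [preX, dxOf, h, h1, h1']
    · show numStart m c + ((m - c : Nat) : Int) = numStart m (c + 1)
      simp [numStart]; omega
  case _ =>
    rw [snailStep_eq (c : Int) 1 (by norm_num) (by rw [hmod, h]; try norm_num),
      foldl_runDir, hlen, seqW_eq]
    have h1 : (c + 1) % 3 = 2 := by omega
    have h1' : (c + 1) / 3 = c / 3 := by omega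
    refine Prod.ext ?_ (Prod.ext ?_ (Prod.ext ?_ ?_))
    · show applyW tri _ = applyW tri (passW m c)
      congr 1
      unfold passW
      apply List.map_congr_left
      intro t ht
      have ht' : t < m - c := List.mem_range.mp ht
      refine Prod.ext (Prod.ext ?_ ?_) ?_ <;>
        simp [posY, posX, preY, preX, dyOf, dxOf, h] <;> try omega
    · show preY m c + ((m - c : Nat) : Int) * dyOf 1 = preY m (c + 1)
      simp [preY, dyOf, h, h1, h1']
    · show preX m c + ((m - c : Nat) : Int) * dxOf 1 = preX m (c + 1)
      simp [preX, dxOf, h, h1, h1']; omega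
    · show numStart m c + ((m - c : Nat) : Int) = numStart m (c + 1)
      simp [numStart]; omega
  case _ =>
    rw [snailStep_eq (c : Int) 2 (by norm_num) (by rw [hmod, h]; try norm_num),
      foldl_runDir, hlen, seqW_eq]
    have h1 : (c + 1) % 3 = 0 := by omega
    have h1' : (c + 1) / 3 = c / 3 + 1 := by omega
    refine Prod.ext ?_ (Prod.ext ?_ (Prod.ext ?_ ?_))
    · show applyW tri _ = applyW tri (passW m c)
      congr 1
      unfold passW
      apply List.map_congr_left
      intro t ht
      have ht' : t < m - c := List.mem_range.mp ht
      refine Prod.ext (Prod.ext ?_ ?_) ?_ <;>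
        simp [posY, posX, preY, preX, dyOf, dxOf, h] <;> try omega
    · show preY m c + ((m - c : Nat) : Int) * dyOf 2 = preY m (c + 1)
      simp [preY, dyOf, h, h1, h1']; omega
    · show preX m c + ((m - c : Nat) : Int) * dxOf 2 = preX m (c + 1)
      simp [preX, dxOf, h, h1, h1']; omega
    · show numStart m c + ((m - c : Nat) : Int) = numStart m (c + 1)
      simp [numStart]; omega

-- ---- the whole outer loop ----

lemma outer (m : Nat) (c : Nat) (hc : c ≤ m) :
    (PySem.List.pyRange 0 (c : Int) 1).foldl
        (fun s i => (PySem.List.pyRange i (m : Int) 1).foldl (snailStep i) s)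
        (tri0 m, -1, 0, 1)
      = (applyW (tri0 m) ((List.range c).flatMap (passW m)),
          preY m c, preX m c, numStart m c) := by
  induction c with
  | zero =>
    rw [show ((0 : Nat) : Int) = 0 from rfl, PySem.List.pyRange_one_eq_nil (le_refl 0)]
    norm_num [applyW, preY, preX, numStart]
  | succ c ih =>
    have hc' : c < m := by omega
    have hsplit : PySem.List.pyRange 0 ((c + 1 : Nat) : Int) 1
        = PySem.List.pyRange 0 (c : Int) 1 ++ [(c : Int)] := by
      push_cast
      exact PySem.List.pyRange_one_succ_right (by positivity)
    rw [hsplit, List.foldl_append, ih (by omega), List.foldl_cons, List.foldl_nil]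
    show (PySem.List.pyRange (c : Int) (m : Int) 1).foldl (snailStep (c : Int)) _ = _
    rw [pass_step m c hc']
    refine Prod.ext ?_ rfl
    show applyW (applyW (tri0 m) _) (passW m c) = _
    rw [List.range_succ, List.flatMap_append, List.flatMap_cons, List.flatMap_nil,
      List.append_nil]
    unfold applyW
    rw [List.foldl_append]

-- ---- geometry: the written cells are valid and pairwise distinct ----

lemma pos_valid (m i t : Nat) (hi : i < m) (ht : t < m - i) :
    0 ≤ posX m i t ∧ posX m i t ≤ posY m i t ∧ posY m i t < (m : Int) := by
  have h3 : i % 3 = 0 ∨ i % 3 = 1 ∨ i % 3 = 2 := by omega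
  rcases h3 with h | h | h <;> simp [posY, posX, h] <;> omega

lemma pos_inj (m i t i' t' : Nat) (hi : i < m) (ht : t < m - i) (hi' : i' < m)
    (ht' : t' < m - i') (hY : posY m i t = posY m i' t') (hX : posX m i t = posX m i' t') :
    i = i' ∧ t = t' := by
  have h3 : i % 3 = 0 ∨ i % 3 = 1 ∨ i % 3 = 2 := by omega
  have h3' : i' % 3 = 0 ∨ i' % 3 = 1 ∨ i' % 3 = 2 := by omega
  rcases h3 with h | h | h <;> rcases h3' with h' | h' | h' <;>
    simp [posY, posX, h, h'] at hY hX <;> omega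

lemma WAll_pos_nodup (m : Nat) : ((WAll m).map Prod.fst).Nodup := by
  unfold WAll
  rw [List.map_flatMap]
  apply List.nodup_flatMap.mpr
  constructor
  · intro i hi
    have him : i < m := List.mem_range.mp hi
    unfold passW
    rw [List.map_map]
    apply List.Nodup.map_on ?_ List.nodup_range
    intro t ht t' ht' heq
    simp only [Function.comp_def, Prod.mk.injEq] at heq
    obtain ⟨hY, hX⟩ := heq
    exact (pos_inj m i t i t' him (List.mem_range.mp ht) him (List.mem_range.mp ht')
      hY hX).2
  · apply List.Pairwise.imp ?_ List.pairwise_lt_range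
    intro i i' hlt p hp hp'
    unfold passW at hp hp'
    simp only [List.map_map, List.mem_map, Function.comp_def, List.mem_range] at hp hp'
    obtain ⟨t, ht, rfl⟩ := hp
    obtain ⟨t', ht', heq⟩ := hp'
    simp only [Prod.mk.injEq] at heq
    obtain ⟨hY, hX⟩ := heq
    have him : i < m := by omega
    have him' : i' < m := by omega
    exact absurd (pos_inj m i' t' i t him' ht' him ht hY hX).1 (by omega)

-- ---- initial triangle facts ----

lemma tri0_getD (m a : Nat) (ha : a < m) : (tri0 m).getD a [] = List.replicate (a + 1) 0 := by
  unfold tri0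
  rw [List.getD_eq_getElem?_getD, List.getElem?_map, List.getElem?_range ha]
  rfl

lemma shape_tri0 (m : Nat) : Shape m (tri0 m) :=
  ⟨by simp [tri0], fun a ha => by rw [tri0_getD m a ha]; simp⟩

lemma getCell_tri0 (m : Nat) (p : Int × Int) : getCell (tri0 m) p = 0 := by
  unfold getCell
  by_cases h : p.1.toNat < m
  · rw [tri0_getD m _ h]
    by_cases h2 : p.2.toNat < p.1.toNat + 1
    · rw [List.getD_replicate _ h2]
    · rw [List.getD_eq_getElem?_getD, List.getElem?_eq_none (by simpa using h2)]
      rfl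
  · have hnone : (tri0 m).getD p.1.toNat [] = [] := by
      rw [List.getD_eq_getElem?_getD, List.getElem?_eq_none (by simp [tri0]; omega)]
      rfl
    rw [hnone]
    rfl

lemma sum2_tri0 (m : Nat) : sum2 (tri0 m) = 0 := by
  unfold sum2 tri0
  rw [List.map_map]
  have : ∀ x ∈ List.range m, (List.sum ∘ fun a => List.replicate (a + 1) (0 : Int)) x = 0 := by
    intro x _
    simp [List.sum_replicate]
  rw [List.map_congr_left this]
  simp

-- ---- sums of the written values ----

lemma sum_shift_int (k : Nat) (a : Int) :
    2 * (((List.range k).map (fun (t : Nat) => a + (t : Int))).sum)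
      = 2 * (k : Int) * a + (k : Int) * ((k : Int) - 1) := by
  induction k with
  | zero => simp
  | succ k ih =>
    rw [List.range_succ, List.map_append, List.sum_append]
    push_cast
    simp only [List.map_cons, List.map_nil, List.sum_cons, List.sum_nil]
    linear_combination ih

lemma sum_passW_vals (m i : Nat) :
    2 * ((passW m i).map Prod.snd).sum
      = 2 * ((m - i : Nat) : Int) * numStart m i
        + ((m - i : Nat) : Int) * (((m - i : Nat) : Int) - 1) := by
  unfold passW
  rw [List.map_map]
  exact sum_shift_int (m - i) (numStart m i)

lemma sum_vals (m : Nat) : ∀ c, c ≤ m →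
    2 * ((((List.range c).flatMap (passW m)).map Prod.snd).sum)
      = numStart m c * (numStart m c - 1) := by
  intro c
  induction c with
  | zero => intro _; simp [numStart]
  | succ c ih =>
    intro hc
    rw [List.range_succ, List.flatMap_append, List.flatMap_cons, List.flatMap_nil,
      List.append_nil, List.map_append, List.sum_append]
    have hpass := sum_passW_vals m c
    have ih' := ih (by omega)
    have hnum : numStart m (c + 1) = numStart m c + ((m : Int) - (c : Int)) := by
      simp [numStart]
    have hcast : ((m - c : Nat) : Int) = (m : Int) - (c : Int) := by omega
    rw [hnum]
    rw [hcast] at hpass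
    linear_combination ih' + hpass

lemma numStart_closed (m : Nat) : ∀ c, c ≤ m →
    2 * numStart m c = 2 + (c : Int) * (2 * (m : Int) - (c : Int) + 1) := by
  intro c
  induction c with
  | zero => intro _; simp [numStart]
  | succ c ih =>
    intro hc
    have ih' := ih (by omega)
    simp only [numStart]
    push_cast
    linear_combination ih'

-- ---- initial triangle as built by the port ----

lemma tri0_port (m : Nat) :
    (PySem.List.pyRange 0 (m : Int) 1).map
        (fun i => (PySem.List.pyRange 0 (i + 1) 1).map (fun _ => (0 : Int)))
      = tri0 m := by
  rw [PySem.List.pyRange_one, List.map_map]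
  unfold tri0
  apply List.map_congr_left
  intro k hk
  simp only [Function.comp]
  rw [PySem.List.pyRange_one]
  rw [List.map_map]
  simp only [Function.comp_def]
  rw [List.map_const']
  simp only [List.length_range]
  congr 1
  omega

theorem solution_spec : Claim_equal_solution := by
  unfold Claim_equal_solution Spec_solution
  intro n _
  by_cases hn : n ≤ 0
  · simp [solution, solution_alt, hn, PySem.List.pyRange_one_eq_nil hn]
  · push_neg at hn
    have h0 : 0 ≤ n := le_of_lt hn
    set m : Nat := n.toNat with hm
    have hnm : ((m : Nat) : Int) = n := Int.toNat_of_nonneg h0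
    have hmpos : 0 < m := by omega
    have hA : solution n = sum2 (applyW (tri0 m) (WAll m)) := by
      simp only [solution]
      rw [← hnm, tri0_port m, outer m m (le_refl m)]
      rfl
    have hval : ∀ w ∈ WAll m, Pvalid m w.1 ∧ getCell (tri0 m) w.1 = 0 := by
      intro w hw
      unfold WAll at hw
      rw [List.mem_flatMap] at hw
      obtain ⟨i, hi, hwi⟩ := hw
      unfold passW at hwi
      rw [List.mem_map] at hwi
      obtain ⟨t, ht, rfl⟩ := hwi
      refine ⟨?_, getCell_tri0 m _⟩
      unfold Pvalid
      exact pos_valid m i t (List.mem_range.mp hi) (List.mem_range.mp ht)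
    have hsum := applyW_sum m (WAll m) (tri0 m) (shape_tri0 m) hval (WAll_pos_nodup m)
    set a := numStart m m with ha
    have hv : 2 * ((WAll m).map Prod.snd).sum = a * (a - 1) := by
      unfold WAll
      exact sum_vals m m (le_refl m)
    have hcl : 2 * a = 2 + (m : Int) * (2 * (m : Int) - (m : Int) + 1) :=
      numStart_closed m m (le_refl m)
    have h2S : 2 * solution n = a * (a - 1) := by
      rw [hA, hsum, sum2_tri0]
      linarith [hv]
    have h2a : 2 * (a - 1) = n * (n + 1) := by
      rw [← hnm]; linear_combination hcl
    have htot : PySem.Int.floordiv (n * (n + 1)) 2 = a - 1 := by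
      rw [← h2a, PySem.Int.floordiv_eq_ediv_of_pos (by norm_num)]
      omega
    show solution n = solution_alt n
    unfold solution_alt
    rw [if_neg (by omega), htot,
      PySem.Int.floordiv_eq_ediv_of_pos (by norm_num)]
    have hfin : (a - 1) * (a - 1 + 1) = 2 * solution n := by linear_combination -h2S
    rw [hfin]
    omega
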